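-- pv_equiv track=rewrite | github.com/chmoder/health-check | main.py | calculate_uptime
-- ===== SOURCE A (Python) =====
-- from typing import List, Dict
--
-- def calculate_uptime(all_checks: List[Dict]) -> dict:
--     """
--     converts from: [{'host': 'example.com', 'is_up': True}]
--     to: {'example.com': {'up': 0, 'total': 0, 'uptime': 0}}
--     :param all_checks:
--     :return:
--     """
--     processed_checks = { item["host"]: {'up': 0, 'total': 0, 'uptime': 0} for item in all_checks }
--
--     for check in all_checks:
--         host_name = check.get('host')
--         is_up = check.get('is_up')
--
--         if is_up:
--             processed_checks[host_name]['up'] += 1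
--
--         processed_checks[host_name]['total'] += 1
--         processed_checks[host_name]['uptime'] = int((processed_checks[host_name]['up'] / processed_checks[host_name]['total']) * 100)
--
--     return processed_checks
-- ===== SOURCE B (Python) =====
-- from typing import List, Dict
--
--
-- def calculate_uptime(all_checks: List[Dict]) -> dict:
--     # Group the checks by host first, then finalize each group in one go.
--     groups = {}
--     for item in all_checks:
--         groups.setdefault(item["host"], []).append(item)
--
--     result = {}
--     for host, checks in groups.items():
--         up = sum(1 for c in checks if c.get('is_up'))
--         total = len(checks)
--         result[host] = {'up': up, 'total': total, 'uptime': int((up / total) * 100)}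
--     return result
-- ===== Notes on version B (the rewrite author's own statement) =====
-- stated objective: alternative
-- what changed: Replaces A's incremental per-row accumulate-and-recompute over a pre-seeded dict with a group-by-host pass followed by a separate finalize pass that counts up/total and computes the uptime once per host.
import Mathlib
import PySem

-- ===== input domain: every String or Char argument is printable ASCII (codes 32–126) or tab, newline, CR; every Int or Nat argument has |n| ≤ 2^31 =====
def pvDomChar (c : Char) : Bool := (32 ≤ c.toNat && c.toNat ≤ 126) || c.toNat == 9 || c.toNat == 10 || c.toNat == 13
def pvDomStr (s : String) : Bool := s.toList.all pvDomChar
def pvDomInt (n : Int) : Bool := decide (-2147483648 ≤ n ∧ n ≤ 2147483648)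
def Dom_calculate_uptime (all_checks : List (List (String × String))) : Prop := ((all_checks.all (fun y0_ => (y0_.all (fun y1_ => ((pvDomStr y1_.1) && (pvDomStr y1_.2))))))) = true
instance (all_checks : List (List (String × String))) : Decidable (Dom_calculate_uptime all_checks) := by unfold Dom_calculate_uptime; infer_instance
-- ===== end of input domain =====

-- B replaces A's per-row accumulate-and-recompute over a pre-seeded dict by a group-by-host
-- pass followed by a separate finalize pass (objective: alternative decomposition, same cost).

-- ===== PORT A =====
-- shared Python-semantics helpers (both Pythons evaluate the same expressions):
-- item["host"] / check.get('host') — first-match lookup in the check dict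
def pvHost (check : List (String × String)) : String :=
  ((PySem.Dict.mk check).get? "host").getD ""
-- truthiness of check.get('is_up'): None and "" are falsy, any other string truthy
def pvIsUp (check : List (String × String)) : Bool :=
  !(((PySem.Dict.mk check).get? "is_up").getD "" == "")

-- exact integer emulation of Python's  int((up/total)*100)  (IEEE-754 binary64:
-- round up/total to nearest double (ties to even), multiply by 100 with the same
-- rounding, truncate); exact for 0 ≤ up ≤ total, total ≥ 1 — both Pythons run
-- this very float expression, so both ports share this helper.
def pvRNE (num den : Nat) : Nat :=
  let q := num / den
  let r := num % den
  if 2 * r < den then q else if 2 * r > den then q + 1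
  else if q % 2 == 0 then q else q + 1

def pvCand (num den : Nat) (s : Int) : Nat :=
  if 0 ≤ s then pvRNE (num * 2 ^ s.toNat) den else pvRNE num (den * 2 ^ (-s).toNat)

def pvRoundToDouble (num den : Nat) : Nat × Int :=
  let s : Int := 53 + ((Nat.log2 den : Int) + 1) - ((Nat.log2 num : Int) + 1)
  let m := pvCand num den s
  let p := if m < 2 ^ 52 then (pvCand num den (s + 1), s + 1) else (m, s)
  if p.1 ≥ 2 ^ 53 then (pvCand num den (p.2 - 1), p.2 - 1) else p

def pvUptimePct (up total : Int) : Int :=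
  if up == 0 then 0
  else
    let p1 := pvRoundToDouble up.toNat total.toNat
    let p2 := pvRoundToDouble (100 * p1.1) (2 ^ p1.2.toNat)
    ((p2.1 / 2 ^ p2.2.toNat : Nat) : Int)

def pvZeroE : PySem.Dict String Int :=
  PySem.Dict.mk [("up", 0), ("total", 0), ("uptime", 0)]

-- the body of A's for-loop
def pvStepA (d : PySem.Dict String (PySem.Dict String Int)) (check : List (String × String)) :
    PySem.Dict String (PySem.Dict String Int) :=
  (((if pvIsUp check then d.modify (pvHost check) pvZeroE (fun e => e.modify "up" 0 (· + 1)) else d).modify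
      (pvHost check) pvZeroE (fun e => e.modify "total" 0 (· + 1))).modify
    (pvHost check) pvZeroE
    (fun e => e.insert "uptime" (pvUptimePct (e.getD "up" 0) (e.getD "total" 0))))

def calculate_uptime (all_checks : List (List (String × String))) : List (String × List (String × Int)) :=
  ((all_checks.foldl pvStepA
      (all_checks.foldl (fun d item => d.insert (pvHost item) pvZeroE) PySem.Dict.empty)).items.map
    (fun p => (p.1, p.2.items)))

-- ===== PORT B =====
def pvUpCount (checks : List (List (String × String))) : Int :=
  ((checks.filter pvIsUp).length : Int)

def pvFinalize (h : String) (checks : List (List (String × String))) : String × List (String × Int) :=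
  (h, [("up", pvUpCount checks), ("total", (checks.length : Int)),
       ("uptime", pvUptimePct (pvUpCount checks) (checks.length : Int))])

def calculate_uptime_alt (all_checks : List (List (String × String))) : List (String × List (String × Int)) :=
  ((all_checks.foldl (fun d c => d.modify (pvHost c) [] (· ++ [c])) PySem.Dict.empty).items.map
    (fun p => pvFinalize p.1 p.2))

-- ===== PRECONDITION & SPEC =====
-- Pre_ excludes exactly the inputs where Python A raises KeyError: some check without a "host" key.
def Pre_calculate_uptime (all_checks : List (List (String × String))) : Prop :=
  ∀ check ∈ all_checks, (PySem.Dict.mk check).contains "host" = true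
instance (all_checks : List (List (String × String))) : Decidable (Pre_calculate_uptime all_checks) := by
  unfold Pre_calculate_uptime; infer_instance

def pvWitness_calculate_uptime : (List (List (String × String))) :=
  [[("host", "a"), ("is_up", "1")], [("host", "a")]]

def Spec_calculate_uptime (all_checks : List (List (String × String))) (out : List (String × List (String × Int))) : Prop := out = calculate_uptime_alt all_checks
instance (all_checks : List (List (String × String))) (out : List (String × List (String × Int))) : Decidable (Spec_calculate_uptime all_checks out) := by unfold Spec_calculate_uptime; infer_instance

-- ===== CLAIM (what is proved, stated in full; the proofs are below) =====
def Claim_equal_calculate_uptime : Prop := ∀ (all_checks : List (List (String × String))), Dom_calculate_uptime all_checks → Pre_calculate_uptime all_checks → Spec_calculate_uptime all_checks (calculate_uptime all_checks)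


-- ===== LEMMAS AND PROOFS =====

-- the per-host inner update A performs when a check of this host is met
def pvInnerA (e : PySem.Dict String Int) (c : List (String × String)) : PySem.Dict String Int :=
  ((if pvIsUp c then e.modify "up" 0 (· + 1) else e).modify "total" 0 (· + 1)).insert "uptime"
    (pvUptimePct (((if pvIsUp c then e.modify "up" 0 (· + 1) else e).modify "total" 0 (· + 1)).getD "up" 0)
      (((if pvIsUp c then e.modify "up" 0 (· + 1) else e).modify "total" 0 (· + 1)).getD "total" 0))

def pvE (u t p : Int) : PySem.Dict String Int :=
  PySem.Dict.mk [("up", u), ("total", t), ("uptime", p)]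

theorem pvZeroE_eq : pvZeroE = pvE 0 0 0 := rfl

theorem pvInnerA_literal (u t p : Int) (c : List (String × String)) :
    pvInnerA (pvE u t p) c =
      pvE (u + (if pvIsUp c then 1 else 0)) (t + 1)
          (pvUptimePct (u + (if pvIsUp c then 1 else 0)) (t + 1)) := by
  unfold pvInnerA
  cases pvIsUp c <;>
    simp [pvE, PySem.Dict.modify, PySem.Dict.contains, PySem.Dict.insert,
      PySem.Dict.getD, PySem.Dict.get?]

theorem pvE_congr (a b a2 b2 a' b' a2' b2' : Int) (ha : a = a') (hb : b = b')
    (ha2 : a2 = a2') (hb2 : b2 = b2') :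
    pvE a b (pvUptimePct a2 b2) = pvE a' b' (pvUptimePct a2' b2') := by
  rw [ha, hb, ha2, hb2]

theorem pvUpCount_cons (c : List (String × String)) (cs : List (List (String × String))) :
    pvUpCount (c :: cs) = (if pvIsUp c then (1 : Int) else 0) + pvUpCount cs := by
  simp only [pvUpCount, List.filter_cons]
  cases pvIsUp c <;> simp [Int.add_comm]

theorem pvApplyA_literal (cs : List (List (String × String))) :
    ∀ u t p, cs.foldl pvInnerA (pvE u t p) =
      pvE (u + pvUpCount cs) (t + (cs.length : Int))
          (if cs.isEmpty then p else pvUptimePct (u + pvUpCount cs) (t + (cs.length : Int))) := by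
  induction cs with
  | nil => intro u t p; simp [pvUpCount]
  | cons c cs ih =>
    intro u t p
    rw [List.foldl_cons, pvInnerA_literal, ih, pvUpCount_cons]
    have hcons : (c :: cs).isEmpty = false := rfl
    rw [hcons]
    by_cases hcs : cs = []
    · subst hcs
      simp only [List.isEmpty_nil, if_true, pvUpCount, List.filter_nil, List.length_nil,
        List.length_cons, Int.natCast_zero, add_zero, Nat.cast_one, Nat.zero_add,
        Bool.false_eq_true, if_false]
    · have hne : cs.isEmpty = false := by simp [hcs]
      rw [hne]
      simp only [Bool.false_eq_true, if_false, List.length_cons]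
      exact pvE_congr _ _ _ _ _ _ _ _ (by ring) (by push_cast; ring)
        (by ring) (by push_cast; ring)

theorem pvStepA_getD (d : PySem.Dict String (PySem.Dict String Int)) (c : List (String × String)) (h : String) :
    (pvStepA d c).getD h pvZeroE =
      if pvHost c == h then pvInnerA (d.getD h pvZeroE) c else d.getD h pvZeroE := by
  by_cases hm : pvHost c = h
  · subst hm
    cases hc : pvIsUp c <;>
      simp [pvStepA, pvInnerA, hc, PySem.Dict.getD_modify_self]
  · have hne : h ≠ pvHost c := fun hh => hm hh.symm
    have hb : (pvHost c == h) = false := by simp [hm]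
    cases hc : pvIsUp c <;>
      simp [pvStepA, hc, hb, PySem.Dict.getD_modify_of_ne _ _ _ hne]

theorem pvFoldA_getD (l : List (List (String × String))) (h : String) :
    ∀ d, (l.foldl pvStepA d).getD h pvZeroE =
      (l.filter (fun c => pvHost c == h)).foldl pvInnerA (d.getD h pvZeroE) := by
  induction l with
  | nil => intro d; rfl
  | cons c l ih =>
    intro d
    rw [List.foldl_cons, ih, List.filter_cons]
    cases hb : (pvHost c == h) <;> simp [pvStepA_getD, hb]

theorem pvSeed_getD (l : List (List (String × String))) (h : String) :
    ∀ d : PySem.Dict String (PySem.Dict String Int), d.getD h pvZeroE = pvZeroE →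
      (l.foldl (fun d item => d.insert (pvHost item) pvZeroE) d).getD h pvZeroE = pvZeroE := by
  induction l with
  | nil => intro d hd; exact hd
  | cons c l ih =>
    intro d hd
    rw [List.foldl_cons]
    apply ih
    rw [PySem.Dict.getD_insert]
    split_ifs <;> simp [hd]

theorem pvKeysModifyAdd {ν : Type} (d : PySem.Dict String ν) (k : String) (d0 : ν) (f : ν → ν) :
    (d.modify k d0 f).keys = PySem.Set.add d.keys k := by
  rw [PySem.Dict.keys_modify]
  by_cases hc : d.contains k = true
  · rw [PySem.Dict.keys_insert_of_contains _ _ hc,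
      PySem.Set.add_of_mem ((PySem.Dict.contains_iff_mem_keys d k).mp hc)]
  · have hc' : d.contains k = false := by simpa using hc
    rw [PySem.Dict.keys_insert_of_not_contains _ _ hc',
      PySem.Set.add_of_not_mem]
    intro hmem
    exact hc ((PySem.Dict.contains_iff_mem_keys d k).mpr hmem)

theorem pvAddAdd {α : Type} [BEq α] [LawfulBEq α] (s : PySem.Set α) (x : α) :
    (s.add x).add x = s.add x :=
  PySem.Set.add_of_mem ((PySem.Set.mem_add s x x).mpr (Or.inr rfl))

theorem pvStepA_keys (d : PySem.Dict String (PySem.Dict String Int)) (c : List (String × String)) :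
    (pvStepA d c).keys = PySem.Set.add d.keys (pvHost c) := by
  unfold pvStepA
  cases hc : pvIsUp c
  · rw [if_neg (by decide), pvKeysModifyAdd, pvKeysModifyAdd, pvAddAdd]
  · rw [if_pos rfl, pvKeysModifyAdd, pvKeysModifyAdd, pvKeysModifyAdd, pvAddAdd, pvAddAdd]

theorem pvFoldA_keys (l : List (List (String × String))) :
    ∀ d, (l.foldl pvStepA d).keys = PySem.Set.update d.keys (l.map pvHost) := by
  induction l with
  | nil => intro d; rfl
  | cons c l ih =>
    intro d
    rw [List.foldl_cons, ih, pvStepA_keys, List.map_cons, PySem.Set.update_cons]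

theorem pvSeed_keys (l : List (List (String × String))) :
    ∀ d : PySem.Dict String (PySem.Dict String Int),
      (l.foldl (fun d item => d.insert (pvHost item) pvZeroE) d).keys =
        PySem.Set.update d.keys (l.map pvHost) := by
  induction l with
  | nil => intro d; rfl
  | cons c l ih =>
    intro d
    rw [List.foldl_cons, ih, List.map_cons, PySem.Set.update_cons]
    congr 1
    rw [PySem.Set.add]
    by_cases hc : d.contains (pvHost c) = true
    · rw [PySem.Dict.keys_insert_of_contains _ _ hc]
      simp [PySem.Set.contains, (PySem.Dict.contains_iff_mem_keys d (pvHost c)).mp hc]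
    · have hc' : d.contains (pvHost c) = false := by simpa using hc
      rw [PySem.Dict.keys_insert_of_not_contains _ _ hc']
      have : pvHost c ∉ d.keys := fun hmem => hc ((PySem.Dict.contains_iff_mem_keys d _).mpr hmem)
      simp [PySem.Set.contains, this]

theorem pvGroups_keys (l : List (List (String × String))) :
    ∀ d : PySem.Dict String (List (List (String × String))),
      (l.foldl (fun d c => d.modify (pvHost c) [] (· ++ [c])) d).keys =
        PySem.Set.update d.keys (l.map pvHost) := by
  induction l with
  | nil => intro d; rfl
  | cons c l ih =>
    intro d
    rw [List.foldl_cons, ih, List.map_cons, PySem.Set.update_cons, pvKeysModifyAdd]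

theorem pvGroups_getD (l : List (List (String × String))) (h : String) :
    (l.foldl (fun d c => d.modify (pvHost c) [] (· ++ [c])) PySem.Dict.empty).getD h [] =
      l.filter (fun c => pvHost c == h) := by
  have hmap : l.foldl (fun d c => d.modify (pvHost c) [] (· ++ [c])) PySem.Dict.empty =
      (l.map (fun c => (pvHost c, c))).foldl (fun d p => d.modify p.1 [] (· ++ [p.2])) PySem.Dict.empty := by
    rw [List.foldl_map]
  rw [hmap, PySem.Dict.getD_foldl_modify_append, PySem.Dict.getD_empty, List.nil_append,
    List.filter_map]
  simp [Function.comp_def]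

theorem pvUpdate_ofList_self {α : Type} [BEq α] [LawfulBEq α] (xs : List α) :
    PySem.Set.update (PySem.Set.ofList xs) xs = PySem.Set.ofList xs := by
  rw [PySem.Set.update_eq_append_filter]
  have : (PySem.Set.ofList xs).filter (fun y => !(PySem.Set.ofList xs).contains y) = [] := by
    rw [List.filter_eq_nil_iff]
    intro y hy
    rw [(PySem.Set.contains_iff _ y).mpr hy]
    simp
  rw [this, List.append_nil]

-- ===== VERDICT (by name: the statement is the Claim_ definition above) =====
theorem calculate_uptime_spec : Claim_equal_calculate_uptime := by
  intro all_checks _ _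
  unfold Spec_calculate_uptime calculate_uptime calculate_uptime_alt
  set hosts := all_checks.map pvHost with hhosts
  -- the seeded dict
  set processed := all_checks.foldl (fun d item => d.insert (pvHost item) pvZeroE) PySem.Dict.empty with hproc
  set finalA := all_checks.foldl pvStepA processed with hfin
  set groups := all_checks.foldl (fun d c => d.modify (pvHost c) [] (· ++ [c])) PySem.Dict.empty with hgr
  have hkproc : processed.keys = PySem.Set.ofList hosts := by
    rw [hproc, pvSeed_keys, PySem.Dict.keys_empty, PySem.Set.update_nil_left]
  have hkA : finalA.keys = PySem.Set.ofList hosts := by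
    rw [hfin, pvFoldA_keys, hkproc, pvUpdate_ofList_self]
  have hkB : groups.keys = PySem.Set.ofList hosts := by
    rw [hgr, pvGroups_keys, PySem.Dict.keys_empty, PySem.Set.update_nil_left]
  have hndA : finalA.keys.Nodup := by rw [hkA]; exact PySem.Set.nodup_ofList hosts
  have hndB : groups.keys.Nodup := by rw [hkB]; exact PySem.Set.nodup_ofList hosts
  rw [PySem.Dict.items_eq_map_keys finalA hndA pvZeroE,
    PySem.Dict.items_eq_map_keys groups hndB [], hkA, hkB, List.map_map, List.map_map]
  apply List.map_congr_left
  intro h hh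
  rcases List.mem_map.mp ((PySem.Set.mem_ofList hosts h).mp hh) with ⟨c, hc, hch⟩
  -- the checks of this host
  set cs := all_checks.filter (fun c => pvHost c == h) with hcs
  have hcmem : c ∈ cs := by
    rw [hcs]
    exact List.mem_filter.mpr ⟨hc, by simp [hch]⟩
  have hcsne : cs.isEmpty = false := by
    cases hx : cs with
    | nil => rw [hx] at hcmem; cases hcmem
    | cons a l => simp
  have hA : finalA.getD h pvZeroE = pvE (pvUpCount cs) (cs.length : Int) (pvUptimePct (pvUpCount cs) (cs.length : Int)) := by
    rw [hfin, pvFoldA_getD, pvSeed_getD all_checks h PySem.Dict.empty (PySem.Dict.getD_empty _ _),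
      pvZeroE_eq, ← hcs, pvApplyA_literal, hcsne]
    simp
  have hB : groups.getD h [] = cs := by rw [hgr, pvGroups_getD, hcs]
  simp only [Function.comp_def, hA, hB, pvFinalize, pvE]
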